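-- pv_equiv track=rewrite | github.com/eroge-69/PyToExe | python-files/import pygame.py | handle_menu_click
-- ===== SOURCE A (Python) =====
-- SCREEN_WIDTH = 1024
--
-- def handle_menu_click(pos):
--     x, y = pos
--     buttons = [
--         [SCREEN_WIDTH//2 - 100, 250, 200, 50],  # 3D World
--         [SCREEN_WIDTH//2 - 100, 320, 200, 50],  # Calculator
--         [SCREEN_WIDTH//2 - 100, 390, 200, 50]   # Quit
--     ]
--
--     for i, button in enumerate(buttons):
--         btn_x, btn_y, btn_w, btn_h = button
--         if btn_x <= x <= btn_x + btn_w and btn_y <= y <= btn_y + btn_h: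
--             return i + 1  # 1: 3D World, 2: Calculator, 3: Quit
--     return 0
-- ===== SOURCE B (Python) =====
-- SCREEN_WIDTH = 1024
--
-- def handle_menu_click(pos):
--     x, y = pos
--     # all buttons share x-band [SCREEN_WIDTH//2 - 100, SCREEN_WIDTH//2 + 100]
--     if not (SCREEN_WIDTH // 2 - 100 <= x <= SCREEN_WIDTH // 2 + 100):
--         return 0
--     k, r = divmod(y - 250, 70)
--     if 0 <= k <= 2 and r <= 50:
--         return k + 1
--     return 0
-- ===== Notes on version B (the rewrite author's own statement) =====
-- stated objective: simpler
-- what changed: Replaces the scan over the button list with a closed-form index computation: one shared x-band test plus divmod(y-250, 70) to pick the button row.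
import Mathlib
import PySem

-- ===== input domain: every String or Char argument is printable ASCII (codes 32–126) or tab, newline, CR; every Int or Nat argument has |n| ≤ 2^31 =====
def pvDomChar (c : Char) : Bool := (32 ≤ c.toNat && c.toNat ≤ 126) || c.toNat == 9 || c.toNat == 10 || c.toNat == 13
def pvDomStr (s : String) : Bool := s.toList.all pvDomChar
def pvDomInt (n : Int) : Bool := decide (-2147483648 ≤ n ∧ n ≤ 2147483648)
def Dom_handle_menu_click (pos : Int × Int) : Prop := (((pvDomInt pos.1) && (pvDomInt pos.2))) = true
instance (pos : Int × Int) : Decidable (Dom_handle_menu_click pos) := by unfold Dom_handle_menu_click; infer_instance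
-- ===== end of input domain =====

-- B replaces A's scan over the button list by a closed-form row computation (simpler, O(1) per call).

def pvSCREEN_WIDTH : Int := 1024

-- ===== PORT A =====
-- the for-loop over enumerate(buttons): first matching button wins
def pvScanButtons (x y : Int) : List (Int × (Int × Int × Int × Int)) → Int
  | [] => 0
  | (i, (bx, by_, bw, bh)) :: rest =>
      if bx ≤ x ∧ x ≤ bx + bw ∧ by_ ≤ y ∧ y ≤ by_ + bh then i + 1
      else pvScanButtons x y rest

def handle_menu_click (pos : Int × Int) : Int :=
  let x := pos.1
  let y := pos.2
  let buttons : List (Int × Int × Int × Int) :=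
    [ (PySem.Int.floordiv pvSCREEN_WIDTH 2 - 100, 250, 200, 50),
      (PySem.Int.floordiv pvSCREEN_WIDTH 2 - 100, 320, 200, 50),
      (PySem.Int.floordiv pvSCREEN_WIDTH 2 - 100, 390, 200, 50) ]
  pvScanButtons x y (PySem.List.enumerate buttons)

-- ===== PORT B =====
def handle_menu_click_alt (pos : Int × Int) : Int :=
  let x := pos.1
  let y := pos.2
  if ¬ (PySem.Int.floordiv pvSCREEN_WIDTH 2 - 100 ≤ x ∧ x ≤ PySem.Int.floordiv pvSCREEN_WIDTH 2 + 100) then 0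
  else
    let k := PySem.Int.floordiv (y - 250) 70
    let r := PySem.Int.mod (y - 250) 70
    if 0 ≤ k ∧ k ≤ 2 ∧ r ≤ 50 then k + 1 else 0

-- ===== PRECONDITION & SPEC =====
def Spec_handle_menu_click (pos : Int × Int) (out : Int) : Prop := out = handle_menu_click_alt pos
instance (pos : Int × Int) (out : Int) : Decidable (Spec_handle_menu_click pos out) := by unfold Spec_handle_menu_click; infer_instance

-- ===== CLAIM (what is proved, stated in full; the proofs are below) =====
def Claim_equal_handle_menu_click : Prop := ∀ (pos : Int × Int), Dom_handle_menu_click pos → Spec_handle_menu_click pos (handle_menu_click pos)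

-- ===== LEMMAS AND PROOFS =====

-- ===== VERDICT (by name: the statement is the Claim_ definition above) =====
theorem handle_menu_click_spec : Claim_equal_handle_menu_click := by
  intro ⟨x, y⟩ _
  show handle_menu_click (x, y) = handle_menu_click_alt (x, y)
  simp only [handle_menu_click, handle_menu_click_alt, pvSCREEN_WIDTH,
    PySem.List.enumerate, pvScanButtons,
    PySem.Int.floordiv_eq_ediv_of_pos (a := y - 250) (by norm_num : (0:Int) < 70),
    PySem.Int.mod_eq_emod_of_pos (a := y - 250) (by norm_num : (0:Int) < 70)]
  norm_num
  split_ifs <;> omega
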